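-- pv_equiv track=rewrite | github.com/jjoshua2/arc_agi | unsolved/2025-10-01T04-50-40Z/a64e4611_best2.py | transform
-- ===== SOURCE A (Python) =====
-- from collections import deque
-- from typing import List
--
-- def transform(grid: List[List[int]]) -> List[List[int]]:
--     if not grid or not grid[0]:
--         return []
--     rows, cols = len(grid), len(grid[0])
--     output = [row[:] for row in grid]
--     visited = [[False] * cols for _ in range(rows)]
--
--     q = deque()
--
--     # Add all border 0 cells to the queue
--     for i in range(rows):
--         if grid[i][0] == 0:
--             q.append((i, 0))
--             visited[i][0] = True
--         if grid[i][cols - 1] == 0: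
--             q.append((i, cols - 1))
--             visited[i][cols - 1] = True
--
--     for j in range(cols):
--         if grid[0][j] == 0:
--             q.append((0, j))
--             visited[0][j] = True
--         if grid[rows - 1][j] == 0:
--             q.append((rows - 1, j))
--             visited[rows - 1][j] = True
--
--     directions = [(-1, 0), (1, 0), (0, -1), (0, 1)]
--
--     # BFS to mark all reachable 0 cells from borders
--     while q:
--         r, c = q.popleft()
--         for dr, dc in directions:
--             nr, nc = r + dr, c + dc
--             if 0 <= nr < rows and 0 <= nc < cols and grid[nr][nc] == 0 and not visited[nr][nc]:
--                 visited[nr][nc] = True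
--                 q.append((nr, nc))
--
--     # Fill unreachable 0 cells with 3
--     for r in range(rows):
--         for c in range(cols):
--             if grid[r][c] == 0 and not visited[r][c]:
--                 output[r][c] = 3
--
--     return output
-- ===== SOURCE B (Python) =====
-- def transform(grid):
--     if not grid or not grid[0]:
--         return []
--     rows, cols = len(grid), len(grid[0])
--     # round-based saturation: start from the border zeros, repeatedly absorb
--     # zero cells adjacent to the current region until nothing changes
--     reach = {(r, c) for r in range(rows) for c in range(cols)
--              if grid[r][c] == 0
--              and (r == 0 or r == rows - 1 or c == 0 or c == cols - 1)}
--     while True: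
--         new = {(r, c) for r in range(rows) for c in range(cols)
--                if grid[r][c] == 0 and (r, c) not in reach
--                and ((r - 1, c) in reach or (r + 1, c) in reach
--                     or (r, c - 1) in reach or (r, c + 1) in reach)}
--         if not new:
--             break
--         reach |= new
--     out = [row[:] for row in grid]
--     for r in range(rows):
--         for c in range(cols):
--             if grid[r][c] == 0 and (r, c) not in reach:
--                 out[r][c] = 3
--     return out
-- ===== Notes on version B (the rewrite author's own statement) =====
-- stated objective: alternative
-- what changed: Replaces the queue-based multi-source BFS over a visited matrix by a round-based saturation: start from the set of border zero cells and repeatedly sweep the whole grid absorbing zero cells adjacent to the current region until a sweep adds nothing, then fill the untouched zeros with 3.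
import Mathlib
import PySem

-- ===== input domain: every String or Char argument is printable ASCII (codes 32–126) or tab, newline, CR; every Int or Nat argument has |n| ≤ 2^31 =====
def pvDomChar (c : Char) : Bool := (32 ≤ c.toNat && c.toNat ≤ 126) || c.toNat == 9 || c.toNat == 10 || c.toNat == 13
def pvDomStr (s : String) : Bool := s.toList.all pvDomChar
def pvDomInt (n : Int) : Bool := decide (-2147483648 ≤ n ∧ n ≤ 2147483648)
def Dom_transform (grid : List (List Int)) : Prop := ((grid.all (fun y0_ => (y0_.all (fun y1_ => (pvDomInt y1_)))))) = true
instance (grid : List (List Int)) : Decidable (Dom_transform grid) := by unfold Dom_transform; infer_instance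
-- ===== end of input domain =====

-- B replaces A's queue-based multi-source BFS by a round-based saturation (whole-grid
-- sweeps absorbing zero cells adjacent to the region until a sweep adds nothing);
-- objective: alternative. Neither program mutates its argument.

-- shared helper: grid[r][c] == 0 (both Pythons evaluate this only with 0 <= r, 0 <= c, so no negative wrap)
def zeroAt (g : List (List Int)) (p : Int × Int) : Bool :=
  ((PySem.List.pyGet? g p.1).bind (fun row => PySem.List.pyGet? row p.2)) == some 0

-- shared helper: the final fill loop, identical in both Pythons:
-- 'for r in range(rows): for c in range(cols): if mark(r,c): out[r][c] = 3' on a copy of grid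
-- (r and c come from range, hence are nonnegative: .toNat is exact here)
def setCell (out : List (List Int)) (r c : Int) (v : Int) : List (List Int) :=
  out.modify r.toNat (fun row => row.set c.toNat v)

def fillOut (g : List (List Int)) (rows cols : Int) (mark : Int × Int → Bool) : List (List Int) :=
  (PySem.List.pyRange 0 rows 1).foldl (fun out r =>
    (PySem.List.pyRange 0 cols 1).foldl (fun out c =>
      if mark (r, c) then setCell out r c 3 else out) out) g

-- ===== PORT A =====
def dirsA : List (Int × Int) := [(-1, 0), (1, 0), (0, -1), (0, 1)]

-- body of A's inner 'for dr, dc in directions' loop (the visited matrix is ported as the set of True cells)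
def bfsStep (g : List (List Int)) (rows cols : Int) (p : Int × Int)
    (st : PySem.Set (Int × Int) × List (Int × Int)) (d : Int × Int) :
    PySem.Set (Int × Int) × List (Int × Int) :=
  let n : Int × Int := (p.1 + d.1, p.2 + d.2)
  if (decide (0 ≤ n.1) && decide (n.1 < rows) && decide (0 ≤ n.2) && decide (n.2 < cols))
      && zeroAt g n && !(PySem.Set.contains st.1 n) then
    (PySem.Set.add st.1 n, st.2 ++ [n])
  else st

-- A's 'while q' BFS loop; the fuel only makes the loop structurally total — it is
-- provably never exhausted at the call site (each enqueue marks a fresh cell visited)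
def bfsA (g : List (List Int)) (rows cols : Int) :
    Nat → List (Int × Int) → PySem.Set (Int × Int) → PySem.Set (Int × Int)
  | 0, _, visited => visited
  | _ + 1, [], visited => visited
  | fuel + 1, p :: rest, visited =>
      let st := dirsA.foldl (bfsStep g rows cols p) (visited, [])
      bfsA g rows cols fuel (rest ++ st.2) st.1

-- bodies of A's two border-seeding 'for' loops
def seedRow (g : List (List Int)) (cols : Int)
    (st : List (Int × Int) × PySem.Set (Int × Int)) (i : Int) :
    List (Int × Int) × PySem.Set (Int × Int) :=
  let st := if zeroAt g (i, (0 : Int)) then (st.1 ++ [(i, (0 : Int))], PySem.Set.add st.2 (i, (0 : Int))) else st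
  if zeroAt g (i, cols - 1) then (st.1 ++ [(i, cols - 1)], PySem.Set.add st.2 (i, cols - 1)) else st

def seedCol (g : List (List Int)) (rows : Int)
    (st : List (Int × Int) × PySem.Set (Int × Int)) (j : Int) :
    List (Int × Int) × PySem.Set (Int × Int) :=
  let st := if zeroAt g ((0 : Int), j) then (st.1 ++ [((0 : Int), j)], PySem.Set.add st.2 ((0 : Int), j)) else st
  if zeroAt g (rows - 1, j) then (st.1 ++ [(rows - 1, j)], PySem.Set.add st.2 (rows - 1, j)) else st

def transform (grid : List (List Int)) : List (List Int) :=
  if grid = [] ∨ grid.headD [] = [] then []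
  else
    let rows : Int := grid.length
    let cols : Int := (grid.headD []).length
    let s1 := (PySem.List.pyRange 0 rows 1).foldl (seedRow grid cols) ([], PySem.Set.empty)
    let s2 := (PySem.List.pyRange 0 cols 1).foldl (seedCol grid rows) s1
    let visited := bfsA grid rows cols (s2.1.length + grid.length * (grid.headD []).length) s2.1 s2.2
    fillOut grid rows cols (fun p => zeroAt grid p && !(PySem.Set.contains visited p))

-- ===== PORT B =====
-- [(r, c) for r in range(rows) for c in range(cols)]
def cellsOf (rows cols : Int) : List (Int × Int) :=
  (PySem.List.pyRange 0 rows 1).flatMap (fun r => (PySem.List.pyRange 0 cols 1).map (fun c => (r, c)))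

-- '(r-1,c) in reach or (r+1,c) in reach or (r,c-1) in reach or (r,c+1) in reach'
def nbrIn (reach : PySem.Set (Int × Int)) (p : Int × Int) : Bool :=
  PySem.Set.contains reach (p.1 - 1, p.2) || PySem.Set.contains reach (p.1 + 1, p.2) ||
  PySem.Set.contains reach (p.1, p.2 - 1) || PySem.Set.contains reach (p.1, p.2 + 1)

-- B's 'while True' saturation loop; fuel rows*cols+1 is provably enough (each round grows the set)
def satB (g : List (List Int)) (cells : List (Int × Int)) :
    Nat → PySem.Set (Int × Int) → PySem.Set (Int × Int)
  | 0, reach => reach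
  | fuel + 1, reach =>
      let nw := PySem.Set.ofList (cells.filter (fun p =>
        zeroAt g p && !(PySem.Set.contains reach p) && nbrIn reach p))
      if nw = [] then reach else satB g cells fuel (PySem.Set.union reach nw)

def transform_alt (grid : List (List Int)) : List (List Int) :=
  if grid = [] ∨ grid.headD [] = [] then []
  else
    let rows : Int := grid.length
    let cols : Int := (grid.headD []).length
    let cs := cellsOf rows cols
    let reach0 := PySem.Set.ofList (cs.filter (fun p =>
      zeroAt grid p && (p.1 == 0 || p.1 == rows - 1 || p.2 == 0 || p.2 == cols - 1)))
    let reach := satB grid cs (grid.length * (grid.headD []).length + 1) reach0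
    fillOut grid rows cols (fun p => zeroAt grid p && !(PySem.Set.contains reach p))

-- ===== PRECONDITION & SPEC =====
-- Pre_ excludes exactly the grids on which Python A raises IndexError: a row shorter than
-- row 0 (grid[i][cols-1] fails); B raises there too, so nothing is claimed about those inputs.
def Pre_transform (grid : List (List Int)) : Prop :=
  ∀ row ∈ grid, (grid.headD []).length ≤ row.length
instance (grid : List (List Int)) : Decidable (Pre_transform grid) := by
  unfold Pre_transform; infer_instance

def pvWitness_transform : List (List Int) := [[1, 1, 1], [1, 0, 1], [1, 1, 1]]

def Spec_transform (grid : List (List Int)) (out : List (List Int)) : Prop := out = transform_alt grid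
instance (grid : List (List Int)) (out : List (List Int)) : Decidable (Spec_transform grid out) := by unfold Spec_transform; infer_instance

-- ===== CLAIM (what is proved, stated in full; the proofs are below) =====
def Claim_equal_transform : Prop := ∀ (grid : List (List Int)), Dom_transform grid → Pre_transform grid → Spec_transform grid (transform grid)

-- ===== LEMMAS AND PROOFS =====

-- proof-side vocabulary
def inBP (g : List (List Int)) (p : Int × Int) : Prop :=
  0 ≤ p.1 ∧ p.1 < (g.length : Int) ∧ 0 ≤ p.2 ∧ p.2 < ((g.headD []).length : Int)

def onBorder (g : List (List Int)) (p : Int × Int) : Prop :=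
  p.1 = 0 ∨ p.1 = (g.length : Int) - 1 ∨ p.2 = 0 ∨ p.2 = ((g.headD []).length : Int) - 1

def AdjP (p q : Int × Int) : Prop :=
  q = (p.1 - 1, p.2) ∨ q = (p.1 + 1, p.2) ∨ q = (p.1, p.2 - 1) ∨ q = (p.1, p.2 + 1)

-- zero cells connected to a border zero cell through 4-adjacent zero cells
inductive Reach (g : List (List Int)) : Int × Int → Prop
  | border (p : Int × Int) (h1 : inBP g p) (h2 : zeroAt g p = true) (h3 : onBorder g p) : Reach g p
  | step (p q : Int × Int) (h : Reach g p) (h1 : inBP g q) (h2 : zeroAt g q = true)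
      (h3 : AdjP p q) : Reach g q

def cells (g : List (List Int)) : List (Int × Int) :=
  cellsOf (g.length : Int) ((g.headD []).length : Int)

def unvisited (g : List (List Int)) (v : PySem.Set (Int × Int)) : Nat :=
  ((cells g).filter (fun p => !(PySem.Set.contains v p))).length

lemma bool_eq_of_iff {a b : Bool} (h : a = true ↔ b = true) : a = b := by
  cases a <;> cases b <;> simp_all

lemma contains_iff {α : Type} [BEq α] [LawfulBEq α] (s : PySem.Set α) (x : α) :
    PySem.Set.contains s x = true ↔ x ∈ s := by
  simp [PySem.Set.contains]

lemma adj_symm {p q : Int × Int} (h : AdjP p q) : AdjP q p := by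
  rcases p with ⟨a, b⟩; rcases q with ⟨c, d⟩
  simp only [AdjP, Prod.mk.injEq] at h ⊢
  omega

lemma mem_cells (g : List (List Int)) (p : Int × Int) : p ∈ cells g ↔ inBP g p := by
  simp only [cells, cellsOf, inBP, List.mem_flatMap, List.mem_map,
    PySem.List.mem_pyRange_one]
  constructor
  · rintro ⟨r, ⟨hr0, hr1⟩, c, ⟨hc0, hc1⟩, rfl⟩; exact ⟨hr0, hr1, hc0, hc1⟩
  · rintro ⟨h0, h1, h2, h3⟩; exact ⟨p.1, ⟨h0, h1⟩, p.2, ⟨h2, h3⟩, by simp⟩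

lemma nodup_cells (g : List (List Int)) : (cells g).Nodup := by
  unfold cells cellsOf
  rw [List.nodup_flatMap]
  refine ⟨fun r _ => ?_, ?_⟩
  · exact List.Nodup.map (fun a b h => by simpa using h) (PySem.List.nodup_pyRange_one 0 _)
  · refine (PySem.List.nodup_pyRange_one 0 _).imp ?_
    intro a b hab x hx hx'
    simp only [List.mem_map] at hx hx'
    obtain ⟨c, -, rfl⟩ := hx
    obtain ⟨c', -, he⟩ := hx'
    exact hab ((congrArg Prod.fst he).symm)

lemma length_cells (g : List (List Int)) :
    (cells g).length = g.length * (g.headD []).length := by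
  unfold cells cellsOf
  rw [List.length_flatMap]
  have h : ∀ r : Int, (((PySem.List.pyRange 0 ((g.headD []).length : Int) 1).map
      (fun c => (r, c))).length) = (g.headD []).length := by
    intro r; simp [PySem.List.length_pyRange_one]
  simp only [h]
  rw [List.map_const', List.sum_replicate, PySem.List.length_pyRange_one]
  simp [smul_eq_mul]

lemma unvisited_le (g : List (List Int)) (v : PySem.Set (Int × Int)) :
    unvisited g v ≤ g.length * (g.headD []).length := by
  rw [← length_cells]; exact List.length_filter_le _ _

lemma unvisited_add_fresh (g : List (List Int)) (v : PySem.Set (Int × Int)) (x : Int × Int)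
    (hx : x ∈ cells g) (hfresh : x ∉ v) :
    unvisited g (PySem.Set.add v x) + 1 = unvisited g v := by
  unfold unvisited
  have h1 : (cells g).filter (fun p => !(PySem.Set.contains (PySem.Set.add v x) p))
      = List.filter (fun p => p != x) ((cells g).filter (fun p => !(PySem.Set.contains v p))) := by
    rw [List.filter_filter]
    apply List.filter_congr
    intro y _
    apply bool_eq_of_iff
    simp only [Bool.not_eq_eq_eq_not, Bool.not_true, Bool.and_eq_true, bne_iff_ne,
      ← Bool.not_eq_true]
    simp only [contains_iff, PySem.Set.mem_add]
    constructor
    · intro hy; push Not at hy; exact ⟨hy.2, hy.1⟩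
    · intro hy; push Not; exact ⟨hy.2, hy.1⟩
  have mnodup : ((cells g).filter (fun p => !(PySem.Set.contains v p))).Nodup :=
    (nodup_cells g).filter _
  have hxm : x ∈ (cells g).filter (fun p => !(PySem.Set.contains v p)) := by
    rw [List.mem_filter]
    exact ⟨hx, by simp [hfresh]⟩
  rw [h1, ← List.Nodup.erase_eq_filter mnodup x, List.length_erase_of_mem hxm]
  have := List.length_pos_of_mem hxm
  omega

lemma unvisited_strict (g : List (List Int)) (v w : PySem.Set (Int × Int)) (x : Int × Int)
    (hx : x ∈ cells g) (hxv : x ∉ v) (hxw : x ∈ w) (hmono : ∀ y ∈ v, y ∈ w) :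
    unvisited g w < unvisited g v := by
  unfold unvisited
  have h1 : (cells g).filter (fun p => !(PySem.Set.contains w p))
      = ((cells g).filter (fun p => !(PySem.Set.contains v p))).filter
          (fun p => !(PySem.Set.contains w p)) := by
    rw [List.filter_filter]
    apply List.filter_congr
    intro y _
    apply bool_eq_of_iff
    simp only [Bool.and_eq_true, Bool.not_eq_true', ← Bool.not_eq_true]
    simp only [contains_iff]
    constructor
    · intro hy; exact ⟨hy, fun hyv => hy (hmono y hyv)⟩
    · intro hy; exact hy.1
  rw [h1]
  apply List.length_filter_lt_length_iff_exists.mpr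
  refine ⟨x, ?_, by simp [hxw]⟩
  rw [List.mem_filter]
  exact ⟨hx, by simp [hxv]⟩

-- a set that contains every border zero and is closed under zero-adjacency contains
-- exactly the reachable cells (given it is sound)
lemma closed_complete (g : List (List Int)) (v : PySem.Set (Int × Int))
    (hv : ∀ p ∈ v, Reach g p)
    (hb : ∀ p, inBP g p → zeroAt g p = true → onBorder g p → p ∈ v)
    (hcl : ∀ p ∈ v, ∀ q, AdjP p q → inBP g q → zeroAt g q = true → q ∈ v) :
    ∀ x, x ∈ v ↔ Reach g x := by
  intro x
  constructor
  · exact hv x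
  · intro hr
    induction hr with
    | border p h1 h2 h3 => exact hb p h1 h2 h3
    | step p q h h1 h2 h3 ih => exact hcl p ih q h3 h1 h2

-- ===== A side =====

lemma adjP_dest {p q : Int × Int} (h : AdjP p q) : ∃ d ∈ dirsA, q = (p.1 + d.1, p.2 + d.2) := by
  rcases h with h | h | h | h
  · exact ⟨(-1, 0), by simp [dirsA], by subst h; simp [Prod.ext_iff]; omega⟩
  · exact ⟨(1, 0), by simp [dirsA], by subst h; simp⟩
  · exact ⟨(0, -1), by simp [dirsA], by subst h; simp [Prod.ext_iff]; omega⟩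
  · exact ⟨(0, 1), by simp [dirsA], by subst h; simp⟩

lemma adjP_of_dir (p : Int × Int) {d : Int × Int} (hd : d ∈ dirsA) :
    AdjP p (p.1 + d.1, p.2 + d.2) := by
  simp only [dirsA, List.mem_cons, List.not_mem_nil, or_false] at hd
  rcases hd with rfl | rfl | rfl | rfl <;> simp [AdjP, Prod.ext_iff] <;> omega

lemma inB_decide (g : List (List Int)) (n : Int × Int) (h : inBP g n) :
    (decide (0 ≤ n.1) && decide (n.1 < (g.length : Int)) && decide (0 ≤ n.2)
      && decide (n.2 < ((g.headD []).length : Int))) = true := by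
  obtain ⟨a, b, c, d⟩ := h
  simp only [Bool.and_eq_true, decide_eq_true_eq]
  exact ⟨⟨⟨a, b⟩, c⟩, d⟩

lemma fold_step_inv (g : List (List Int)) (p : Int × Int) :
    ∀ (ds : List (Int × Int)), (∀ d ∈ ds, d ∈ dirsA) →
    ∀ (v : PySem.Set (Int × Int)) (acc : List (Int × Int)), (∀ x ∈ acc, x ∈ v) →
    (∀ x ∈ v, x ∈ (ds.foldl (bfsStep g (g.length : Int) ((g.headD []).length : Int) p) (v, acc)).1) ∧
    (∀ x ∈ (ds.foldl (bfsStep g (g.length : Int) ((g.headD []).length : Int) p) (v, acc)).2,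
      x ∈ (ds.foldl (bfsStep g (g.length : Int) ((g.headD []).length : Int) p) (v, acc)).1) ∧
    (∀ x ∈ (ds.foldl (bfsStep g (g.length : Int) ((g.headD []).length : Int) p) (v, acc)).1,
      x ∈ v ∨ x ∈ (ds.foldl (bfsStep g (g.length : Int) ((g.headD []).length : Int) p) (v, acc)).2) ∧
    (∀ x ∈ (ds.foldl (bfsStep g (g.length : Int) ((g.headD []).length : Int) p) (v, acc)).1,
      x ∈ v ∨ (inBP g x ∧ zeroAt g x = true ∧ AdjP p x)) ∧
    ((ds.foldl (bfsStep g (g.length : Int) ((g.headD []).length : Int) p) (v, acc)).2.length +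
      unvisited g (ds.foldl (bfsStep g (g.length : Int) ((g.headD []).length : Int) p) (v, acc)).1
      = acc.length + unvisited g v) ∧
    (∀ d ∈ ds, inBP g (p.1 + d.1, p.2 + d.2) → zeroAt g (p.1 + d.1, p.2 + d.2) = true →
      (p.1 + d.1, p.2 + d.2) ∈ (ds.foldl (bfsStep g (g.length : Int) ((g.headD []).length : Int) p) (v, acc)).1) ∧
    (∀ x ∈ acc, x ∈ (ds.foldl (bfsStep g (g.length : Int) ((g.headD []).length : Int) p) (v, acc)).2) := by
  intro ds
  induction ds with
  | nil =>
    intro _ v acc hacc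
    exact ⟨fun x h => h, hacc, fun x h => Or.inl h, fun x h => Or.inl h, rfl,
      fun d hd => absurd hd (List.not_mem_nil), fun x h => h⟩
  | cons d ds ih =>
    intro hsub v acc hacc
    have hd : d ∈ dirsA := hsub d (by simp)
    have hsub' : ∀ d' ∈ ds, d' ∈ dirsA := fun d' h => hsub d' (by simp [h])
    simp only [List.foldl_cons]
    by_cases hc : (((decide (0 ≤ p.1 + d.1) && decide (p.1 + d.1 < (g.length : Int))
        && decide (0 ≤ p.2 + d.2) && decide (p.2 + d.2 < ((g.headD []).length : Int)))
        && zeroAt g (p.1 + d.1, p.2 + d.2)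
        && !(PySem.Set.contains v (p.1 + d.1, p.2 + d.2))) = true)
    · have hstep : bfsStep g (g.length : Int) ((g.headD []).length : Int) p (v, acc) d
          = (PySem.Set.add v (p.1 + d.1, p.2 + d.2), acc ++ [(p.1 + d.1, p.2 + d.2)]) := by
        simp only [bfsStep]
        rw [if_pos hc]
      have hc' := hc
      simp only [Bool.and_eq_true] at hc'
      obtain ⟨⟨hc1, hc2⟩, hc3⟩ := hc'
      have hin : inBP g (p.1 + d.1, p.2 + d.2) := by
        simp only [inBP]
        simp only [decide_eq_true_eq] at hc1
        exact ⟨hc1.1.1.1, hc1.1.1.2, hc1.1.2, hc1.2⟩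
      have hfr : (p.1 + d.1, p.2 + d.2) ∉ v := by
        intro hmem
        have hct : PySem.Set.contains v (p.1 + d.1, p.2 + d.2) = true :=
          (contains_iff _ _).mpr hmem
        rw [hct] at hc3
        simp at hc3
      have hacc' : ∀ x ∈ acc ++ [(p.1 + d.1, p.2 + d.2)],
          x ∈ PySem.Set.add v (p.1 + d.1, p.2 + d.2) := by
        intro x hx
        rcases List.mem_append.mp hx with h | h
        · exact (PySem.Set.mem_add _ _ _).mpr (Or.inl (hacc x h))
        · exact (PySem.Set.mem_add _ _ _).mpr (Or.inr (List.mem_singleton.mp h))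
      obtain ⟨M1, M2, M3, M4, M5, M6, M7⟩ := ih hsub' (PySem.Set.add v (p.1 + d.1, p.2 + d.2))
        (acc ++ [(p.1 + d.1, p.2 + d.2)]) hacc'
      rw [hstep]
      refine ⟨?_, M2, ?_, ?_, ?_, ?_, ?_⟩
      · intro x hx; exact M1 x ((PySem.Set.mem_add _ _ _).mpr (Or.inl hx))
      · intro x hx
        rcases M3 x hx with h | h
        · rcases (PySem.Set.mem_add _ _ _).mp h with h' | h'
          · exact Or.inl h'
          · exact Or.inr (M7 x (by simp [h']))
        · exact Or.inr h
      · intro x hx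
        rcases M4 x hx with h | h
        · rcases (PySem.Set.mem_add _ _ _).mp h with h' | h'
          · exact Or.inl h'
          · subst h'; exact Or.inr ⟨hin, hc2, adjP_of_dir p hd⟩
        · exact Or.inr h
      · rw [M5, List.length_append]
        have := unvisited_add_fresh g v (p.1 + d.1, p.2 + d.2) ((mem_cells g _).mpr hin) hfr
        simp only [List.length_singleton]
        omega
      · intro d' hd' h1 h2
        rcases List.mem_cons.mp hd' with rfl | hd''
        · exact M1 _ ((PySem.Set.mem_add _ _ _).mpr (Or.inr rfl))
        · exact M6 d' hd'' h1 h2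
      · intro x hx; exact M7 x (by simp [hx])
    · have hstep : bfsStep g (g.length : Int) ((g.headD []).length : Int) p (v, acc) d
          = (v, acc) := by
        simp only [bfsStep]
        rw [if_neg hc]
      obtain ⟨M1, M2, M3, M4, M5, M6, M7⟩ := ih hsub' v acc hacc
      rw [hstep]
      refine ⟨M1, M2, M3, M4, M5, ?_, M7⟩
      intro d' hd' h1 h2
      rcases List.mem_cons.mp hd' with rfl | hd''
      · -- the guard failed although the cell is in bounds and zero: it was already visited
        by_cases hcv : PySem.Set.contains v (p.1 + d'.1, p.2 + d'.2) = true
        · exact M1 _ ((contains_iff _ _).mp hcv)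
        · exfalso
          apply hc
          have hfalse : PySem.Set.contains v (p.1 + d'.1, p.2 + d'.2) = false :=
            Bool.eq_false_iff.mpr hcv
          rw [inB_decide g _ h1, h2, hfalse]
          rfl
      · exact M6 d' hd'' h1 h2

lemma bfsA_spec (g : List (List Int)) :
    ∀ (fuel : Nat) (q : List (Int × Int)) (v : PySem.Set (Int × Int)),
    (∀ p ∈ q, p ∈ v) →
    (∀ p ∈ v, Reach g p) →
    (∀ p, inBP g p → zeroAt g p = true → onBorder g p → p ∈ v) →
    (∀ p ∈ v, p ∉ q → ∀ n, AdjP p n → inBP g n → zeroAt g n = true → n ∈ v) →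
    q.length + unvisited g v ≤ fuel →
    ∀ x, x ∈ bfsA g (g.length : Int) ((g.headD []).length : Int) fuel q v ↔ Reach g x := by
  intro fuel
  induction fuel with
  | zero =>
    intro q v hq hv hb hcl hfuel x
    have hq0 : q = [] := by
      cases q with
      | nil => rfl
      | cons a l => simp at hfuel
    subst hq0
    simp only [bfsA]
    exact closed_complete g v hv hb (fun p hp q' => hcl p hp (List.not_mem_nil) q') x
  | succ fuel ih =>
    intro q v hq hv hb hcl hfuel x
    cases q with
    | nil =>
      simp only [bfsA]
      exact closed_complete g v hv hb (fun p hp q' => hcl p hp (List.not_mem_nil) q') x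
    | cons p rest =>
      simp only [bfsA]
      have hpv : p ∈ v := hq p (by simp)
      have hpr : Reach g p := hv p hpv
      obtain ⟨M1, M2, M3, M4, M5, M6, M7⟩ :=
        fold_step_inv g p dirsA (fun d h => h) v [] (by simp)
      refine ih _ _ ?_ ?_ ?_ ?_ ?_ x
      · intro y hy
        rcases List.mem_append.mp hy with h | h
        · exact M1 y (hq y (by simp [h]))
        · exact M2 y h
      · intro y hy
        rcases M4 y hy with h | ⟨h1, h2, h3⟩
        · exact hv y h
        · exact Reach.step p y hpr h1 h2 h3
      · intro y h1 h2 h3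
        exact M1 y (hb y h1 h2 h3)
      · intro y hyv hynq n hadj hinb hz
        rcases M3 y hyv with hyv' | hy2
        · by_cases hyp : y = p
          · subst hyp
            obtain ⟨d, hd, rfl⟩ := adjP_dest hadj
            exact M6 d hd hinb hz
          · have hynl : y ∉ p :: rest := by
              simp only [List.mem_cons]
              rintro (h | h)
              · exact hyp h
              · exact hynq (List.mem_append.mpr (Or.inl h))
            exact M1 n (hcl y hyv' hynl n hadj hinb hz)
        · exact absurd (List.mem_append.mpr (Or.inr hy2)) hynq
      · rw [List.length_append]
        simp only [List.length_nil, Nat.zero_add] at M5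
        simp only [List.length_cons] at hfuel
        omega
-- ===== B side =====

lemma satB_spec (g : List (List Int)) :
    ∀ (fuel : Nat) (reach : PySem.Set (Int × Int)),
    (∀ p ∈ reach, Reach g p) →
    (∀ p, inBP g p → zeroAt g p = true → onBorder g p → p ∈ reach) →
    unvisited g reach + 1 ≤ fuel →
    ∀ x, x ∈ satB g (cells g) fuel reach ↔ Reach g x := by
  intro fuel
  induction fuel with
  | zero =>
    intro reach _ _ hfuel
    exact absurd hfuel (by omega)
  | succ fuel ih =>
    intro reach hsound hbord hfuel x
    simp only [satB]
    by_cases hnw : PySem.Set.ofList ((cells g).filter (fun p =>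
        zeroAt g p && !(PySem.Set.contains reach p) && nbrIn reach p)) = ([] : List (Int × Int))
    · rw [if_pos hnw]
      refine closed_complete g reach hsound hbord ?_ x
      intro p hp q hadj hinb hz
      by_contra hq
      have hqc : q ∈ cells g := (mem_cells g q).mpr hinb
      have hnbr : nbrIn reach q = true := by
        have hadj' := adj_symm hadj
        rcases hadj' with h | h | h | h <;>
          (rw [h] at hp; simp only [nbrIn, Bool.or_eq_true, contains_iff]; tauto)
      have hpred : (zeroAt g q && !(PySem.Set.contains reach q) && nbrIn reach q) = true := by
        have hqf : PySem.Set.contains reach q = false :=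
          Bool.eq_false_iff.mpr (fun hcq => hq ((contains_iff _ _).mp hcq))
        rw [hz, hqf, hnbr]
        rfl
      have hmem : q ∈ PySem.Set.ofList ((cells g).filter (fun p =>
          zeroAt g p && !(PySem.Set.contains reach p) && nbrIn reach p)) :=
        (PySem.Set.mem_ofList _ _).mpr (List.mem_filter.mpr ⟨hqc, hpred⟩)
      rw [hnw] at hmem
      exact absurd hmem (List.not_mem_nil)
    · rw [if_neg hnw]
      obtain ⟨x₀, hx₀⟩ := List.exists_mem_of_ne_nil _ hnw
      have hx₀f := (PySem.Set.mem_ofList _ _).mp hx₀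
      obtain ⟨hx₀c, hx₀p⟩ := List.mem_filter.mp hx₀f
      have hx₀p' := hx₀p
      simp only [Bool.and_eq_true] at hx₀p'
      obtain ⟨⟨-, hnc₀⟩, -⟩ := hx₀p'
      have hx₀fresh : x₀ ∉ reach := by
        intro hmem
        rw [(contains_iff _ _).mpr hmem] at hnc₀
        simp at hnc₀
      refine ih (PySem.Set.union reach _) ?_ ?_ ?_ x
      · intro y hy
        rcases (PySem.Set.mem_union _ _ y).mp hy with h | h
        · exact hsound y h
        · obtain ⟨hyc, hyp⟩ := List.mem_filter.mp ((PySem.Set.mem_ofList _ _).mp h)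
          have hin : inBP g y := (mem_cells g y).mp hyc
          simp only [Bool.and_eq_true] at hyp
          obtain ⟨⟨hzy, -⟩, hnb⟩ := hyp
          simp only [nbrIn, Bool.or_eq_true, contains_iff] at hnb
          rcases hnb with ((h1 | h1) | h1) | h1
          · exact Reach.step _ y (hsound _ h1) hin hzy (by simp [AdjP, Prod.ext_iff])
          · exact Reach.step _ y (hsound _ h1) hin hzy (by simp [AdjP, Prod.ext_iff])
          · exact Reach.step _ y (hsound _ h1) hin hzy (by simp [AdjP, Prod.ext_iff])
          · exact Reach.step _ y (hsound _ h1) hin hzy (by simp [AdjP, Prod.ext_iff])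
      · intro p h1 h2 h3
        exact (PySem.Set.mem_union _ _ p).mpr (Or.inl (hbord p h1 h2 h3))
      · have hlt := unvisited_strict g reach (PySem.Set.union reach _) x₀ hx₀c hx₀fresh
          ((PySem.Set.mem_union _ _ x₀).mpr (Or.inr hx₀))
          (fun y hy => (PySem.Set.mem_union _ _ y).mpr (Or.inl hy))
        omega

-- ===== seeding phase of A =====

def seedStep (g : List (List Int)) (c1 c2 : Int → Int × Int)
    (st : List (Int × Int) × PySem.Set (Int × Int)) (i : Int) :
    List (Int × Int) × PySem.Set (Int × Int) :=
  let st := if zeroAt g (c1 i) then (st.1 ++ [c1 i], PySem.Set.add st.2 (c1 i)) else st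
  if zeroAt g (c2 i) then (st.1 ++ [c2 i], PySem.Set.add st.2 (c2 i)) else st

lemma seedRow_eq (g : List (List Int)) (cols : Int) :
    seedRow g cols = seedStep g (fun i => (i, (0 : Int))) (fun i => (i, cols - 1)) := rfl

lemma seedCol_eq (g : List (List Int)) (rows : Int) :
    seedCol g rows = seedStep g (fun j => ((0 : Int), j)) (fun j => (rows - 1, j)) := rfl

def SeedInv (g : List (List Int)) (st : List (Int × Int) × PySem.Set (Int × Int)) : Prop :=
  (∀ x ∈ st.1, x ∈ st.2) ∧ (∀ x ∈ st.2, x ∈ st.1) ∧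
  (∀ x ∈ st.2, inBP g x ∧ zeroAt g x = true ∧ onBorder g x)

lemma seed_one (g : List (List Int)) (c : Int × Int) (hin : inBP g c) (hbd : onBorder g c)
    (st : List (Int × Int) × PySem.Set (Int × Int)) (h : SeedInv g st) :
    SeedInv g (if zeroAt g c then (st.1 ++ [c], PySem.Set.add st.2 c) else st) ∧
    (∀ x ∈ st.2, x ∈ (if zeroAt g c then (st.1 ++ [c], PySem.Set.add st.2 c) else st).2) ∧
    (zeroAt g c = true → c ∈ (if zeroAt g c then (st.1 ++ [c], PySem.Set.add st.2 c) else st).2) := by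
  obtain ⟨h1, h2, h3⟩ := h
  by_cases hz : zeroAt g c = true
  · rw [if_pos hz]
    refine ⟨⟨?_, ?_, ?_⟩, ?_, ?_⟩
    · intro x hx
      rcases List.mem_append.mp hx with hx | hx
      · exact (PySem.Set.mem_add _ _ _).mpr (Or.inl (h1 x hx))
      · exact (PySem.Set.mem_add _ _ _).mpr (Or.inr (List.mem_singleton.mp hx))
    · intro x hx
      rcases (PySem.Set.mem_add _ _ _).mp hx with hx | hx
      · exact List.mem_append.mpr (Or.inl (h2 x hx))
      · exact List.mem_append.mpr (Or.inr (by simp [hx]))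
    · intro x hx
      rcases (PySem.Set.mem_add _ _ _).mp hx with hx | hx
      · exact h3 x hx
      · subst hx; exact ⟨hin, hz, hbd⟩
    · intro x hx; exact (PySem.Set.mem_add _ _ _).mpr (Or.inl hx)
    · intro _; exact (PySem.Set.mem_add _ _ _).mpr (Or.inr rfl)
  · rw [if_neg hz]
    exact ⟨⟨h1, h2, h3⟩, fun x hx => hx, fun hz' => absurd hz' hz⟩

lemma seed_fold (g : List (List Int)) (c1 c2 : Int → Int × Int) (L : List Int)
    (hgood : ∀ i ∈ L, inBP g (c1 i) ∧ onBorder g (c1 i) ∧ inBP g (c2 i) ∧ onBorder g (c2 i)) :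
    ∀ st, SeedInv g st →
      SeedInv g (L.foldl (seedStep g c1 c2) st) ∧
      (∀ x ∈ st.2, x ∈ (L.foldl (seedStep g c1 c2) st).2) ∧
      (∀ i ∈ L, (zeroAt g (c1 i) = true → c1 i ∈ (L.foldl (seedStep g c1 c2) st).2) ∧
                (zeroAt g (c2 i) = true → c2 i ∈ (L.foldl (seedStep g c1 c2) st).2)) := by
  induction L with
  | nil =>
    intro st h
    exact ⟨h, fun x hx => hx, fun i hi => absurd hi (List.not_mem_nil)⟩
  | cons i L ihL =>
    intro st h
    obtain ⟨hg1, hb1, hg2, hb2⟩ := hgood i (by simp)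
    have hgood' : ∀ j ∈ L, inBP g (c1 j) ∧ onBorder g (c1 j) ∧ inBP g (c2 j) ∧ onBorder g (c2 j) :=
      fun j hj => hgood j (by simp [hj])
    obtain ⟨hA1, hA2, hA3⟩ := seed_one g (c1 i) hg1 hb1 st h
    obtain ⟨hB1, hB2, hB3⟩ := seed_one g (c2 i)
      hg2 hb2 (if zeroAt g (c1 i) then (st.1 ++ [c1 i], PySem.Set.add st.2 (c1 i)) else st) hA1
    have hstep : seedStep g c1 c2 st i
        = (if zeroAt g (c2 i) then
            ((if zeroAt g (c1 i) then (st.1 ++ [c1 i], PySem.Set.add st.2 (c1 i)) else st).1 ++ [c2 i],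
             PySem.Set.add (if zeroAt g (c1 i) then (st.1 ++ [c1 i], PySem.Set.add st.2 (c1 i)) else st).2 (c2 i))
          else (if zeroAt g (c1 i) then (st.1 ++ [c1 i], PySem.Set.add st.2 (c1 i)) else st)) := rfl
    obtain ⟨hC1, hC2, hC3⟩ := ihL hgood' _ hB1
    rw [List.foldl_cons, hstep]
    refine ⟨hC1, ?_, ?_⟩
    · intro x hx; exact hC2 x (hB2 x (hA2 x hx))
    · intro j hj
      rcases List.mem_cons.mp hj with rfl | hj'
      · exact ⟨fun hz => hC2 _ (hB2 _ (hA3 hz)), fun hz => hC2 _ (hB3 hz)⟩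
      · exact hC3 j hj'

-- ===== assembly =====

lemma mk_inBP (g : List (List Int)) (p : Int × Int) (h1 : 0 ≤ p.1) (h2 : p.1 < (g.length : Int))
    (h3 : 0 ≤ p.2) (h4 : p.2 < ((g.headD []).length : Int)) : inBP g p := ⟨h1, h2, h3, h4⟩

lemma mk_border (g : List (List Int)) (p : Int × Int)
    (h : p.1 = 0 ∨ p.1 = (g.length : Int) - 1 ∨ p.2 = 0 ∨ p.2 = ((g.headD []).length : Int) - 1) :
    onBorder g p := h

lemma fill_mark_congr (g : List (List Int)) (R C : Int) (A B : PySem.Set (Int × Int))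
    (h : ∀ p, p ∈ A ↔ p ∈ B) :
    fillOut g R C (fun p => zeroAt g p && !(PySem.Set.contains A p))
      = fillOut g R C (fun p => zeroAt g p && !(PySem.Set.contains B p)) := by
  have hfun : (fun p => zeroAt g p && !(PySem.Set.contains A p))
      = (fun p => zeroAt g p && !(PySem.Set.contains B p)) := by
    funext p
    have hc : PySem.Set.contains A p = PySem.Set.contains B p :=
      bool_eq_of_iff ((contains_iff _ _).trans ((h p).trans (contains_iff _ _).symm))
    rw [hc]
  rw [hfun]

lemma transformA_visited (g : List (List Int)) (hgrow : g ≠ []) (hgcol : g.headD [] ≠ []) :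
    ∀ x, x ∈ bfsA g (g.length : Int) ((g.headD []).length : Int)
      ((((PySem.List.pyRange 0 ((g.headD []).length : Int) 1).foldl (seedCol g (g.length : Int))
        ((PySem.List.pyRange 0 ((g.length : Int)) 1).foldl
          (seedRow g ((g.headD []).length : Int)) ([], PySem.Set.empty))).1).length
        + g.length * (g.headD []).length)
      ((PySem.List.pyRange 0 ((g.headD []).length : Int) 1).foldl (seedCol g (g.length : Int))
        ((PySem.List.pyRange 0 ((g.length : Int)) 1).foldl
          (seedRow g ((g.headD []).length : Int)) ([], PySem.Set.empty))).1
      ((PySem.List.pyRange 0 ((g.headD []).length : Int) 1).foldl (seedCol g (g.length : Int))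
        ((PySem.List.pyRange 0 ((g.length : Int)) 1).foldl
          (seedRow g ((g.headD []).length : Int)) ([], PySem.Set.empty))).2
      ↔ Reach g x := by
  have hrows : 0 < (g.length : Int) := by
    have : 0 < g.length := List.length_pos_of_ne_nil hgrow
    exact_mod_cast this
  have hcols : 0 < ((g.headD []).length : Int) := by
    have : 0 < (g.headD []).length := List.length_pos_of_ne_nil hgcol
    exact_mod_cast this
  rw [seedRow_eq g ((g.headD []).length : Int), seedCol_eq g (g.length : Int)]
  have hgood1 : ∀ i ∈ PySem.List.pyRange 0 (g.length : Int) 1,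
      inBP g (i, (0 : Int)) ∧ onBorder g (i, (0 : Int)) ∧
      inBP g (i, ((g.headD []).length : Int) - 1) ∧ onBorder g (i, ((g.headD []).length : Int) - 1) := by
    intro i hi
    rw [PySem.List.mem_pyRange_one] at hi
    exact ⟨mk_inBP g _ hi.1 hi.2 le_rfl hcols,
      mk_border g _ (Or.inr (Or.inr (Or.inl rfl))),
      mk_inBP g _ hi.1 hi.2 (by omega) (by omega),
      mk_border g _ (Or.inr (Or.inr (Or.inr rfl)))⟩
  have hgood2 : ∀ j ∈ PySem.List.pyRange 0 ((g.headD []).length : Int) 1,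
      inBP g ((0 : Int), j) ∧ onBorder g ((0 : Int), j) ∧
      inBP g ((g.length : Int) - 1, j) ∧ onBorder g ((g.length : Int) - 1, j) := by
    intro j hj
    rw [PySem.List.mem_pyRange_one] at hj
    exact ⟨mk_inBP g _ le_rfl hrows hj.1 hj.2,
      mk_border g _ (Or.inl rfl),
      mk_inBP g _ (by omega) (by omega) hj.1 hj.2,
      mk_border g _ (Or.inr (Or.inl rfl))⟩
  have hinv0 : SeedInv g ([], PySem.Set.empty) := by
    refine ⟨?_, ?_, ?_⟩ <;> intro x hx <;> simp [PySem.Set.empty] at hx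
  obtain ⟨S1inv, S1mono, S1cov⟩ := seed_fold g (fun i => (i, (0 : Int)))
    (fun i => (i, ((g.headD []).length : Int) - 1)) (PySem.List.pyRange 0 (g.length : Int) 1)
    hgood1 ([], PySem.Set.empty) hinv0
  obtain ⟨S2inv, S2mono, S2cov⟩ := seed_fold g (fun j => ((0 : Int), j))
    (fun j => ((g.length : Int) - 1, j)) (PySem.List.pyRange 0 ((g.headD []).length : Int) 1)
    hgood2 _ S1inv
  obtain ⟨I1, I2, I3⟩ := S2inv
  refine bfsA_spec g _ _ _ I1 ?_ ?_ ?_ ?_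
  · intro p hp
    exact Reach.border p (I3 p hp).1 (I3 p hp).2.1 (I3 p hp).2.2
  · -- every zero border cell was seeded
    intro p h1 h2 h3
    obtain ⟨hp1, hp2, hp3, hp4⟩ := h1
    rcases h3 with hb | hb | hb | hb
    · have hj : p.2 ∈ PySem.List.pyRange 0 ((g.headD []).length : Int) 1 :=
        PySem.List.mem_pyRange_one.mpr ⟨hp3, hp4⟩
      have hp : p = ((0 : Int), p.2) := Prod.ext_iff.mpr ⟨hb, rfl⟩
      rw [hp] at h2 ⊢
      exact (S2cov p.2 hj).1 h2
    · have hj : p.2 ∈ PySem.List.pyRange 0 ((g.headD []).length : Int) 1 :=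
        PySem.List.mem_pyRange_one.mpr ⟨hp3, hp4⟩
      have hp : p = ((g.length : Int) - 1, p.2) := Prod.ext_iff.mpr ⟨hb, rfl⟩
      rw [hp] at h2 ⊢
      exact (S2cov p.2 hj).2 h2
    · have hi : p.1 ∈ PySem.List.pyRange 0 (g.length : Int) 1 :=
        PySem.List.mem_pyRange_one.mpr ⟨hp1, hp2⟩
      have hp : p = (p.1, (0 : Int)) := Prod.ext_iff.mpr ⟨rfl, hb⟩
      rw [hp] at h2 ⊢
      exact S2mono _ ((S1cov p.1 hi).1 h2)
    · have hi : p.1 ∈ PySem.List.pyRange 0 (g.length : Int) 1 :=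
        PySem.List.mem_pyRange_one.mpr ⟨hp1, hp2⟩
      have hp : p = (p.1, ((g.headD []).length : Int) - 1) := Prod.ext_iff.mpr ⟨rfl, hb⟩
      rw [hp] at h2 ⊢
      exact S2mono _ ((S1cov p.1 hi).2 h2)
  · -- every visited cell is still queued before the BFS starts
    intro p hp hnq
    exact absurd (I2 p hp) hnq
  · have := unvisited_le g
      ((PySem.List.pyRange 0 ((g.headD []).length : Int) 1).foldl
        (seedStep g (fun j => ((0 : Int), j)) (fun j => ((g.length : Int) - 1, j)))
        ((PySem.List.pyRange 0 ((g.length : Int)) 1).foldl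
          (seedStep g (fun i => (i, (0 : Int))) (fun i => (i, ((g.headD []).length : Int) - 1)))
          ([], PySem.Set.empty))).2
    omega

lemma transformB_reach (g : List (List Int)) :
    ∀ x, x ∈ satB g (cellsOf (g.length : Int) ((g.headD []).length : Int))
      (g.length * (g.headD []).length + 1)
      (PySem.Set.ofList ((cellsOf (g.length : Int) ((g.headD []).length : Int)).filter (fun p =>
        zeroAt g p && (p.1 == 0 || p.1 == (g.length : Int) - 1 ||
          p.2 == 0 || p.2 == ((g.headD []).length : Int) - 1))))
      ↔ Reach g x := by
  have hcells : cellsOf (g.length : Int) ((g.headD []).length : Int) = cells g := rfl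
  rw [hcells]
  refine satB_spec g _ _ ?_ ?_ ?_
  · intro p hp
    obtain ⟨hc, hpred⟩ := List.mem_filter.mp ((PySem.Set.mem_ofList _ _).mp hp)
    simp only [Bool.and_eq_true, Bool.or_eq_true, beq_iff_eq] at hpred
    exact Reach.border p ((mem_cells g p).mp hc) hpred.1 (by tauto)
  · intro p h1 h2 h3
    refine (PySem.Set.mem_ofList _ _).mpr (List.mem_filter.mpr ⟨(mem_cells g p).mpr h1, ?_⟩)
    simp only [Bool.and_eq_true, Bool.or_eq_true, beq_iff_eq]
    exact ⟨h2, by rcases h3 with h | h | h | h <;> tauto⟩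
  · have := unvisited_le g (PySem.Set.ofList ((cells g).filter (fun p =>
      zeroAt g p && (p.1 == 0 || p.1 == (g.length : Int) - 1 ||
        p.2 == 0 || p.2 == ((g.headD []).length : Int) - 1))))
    omega

-- ===== VERDICT (by name: the statement is the Claim_ definition above) =====
theorem transform_spec : Claim_equal_transform := by
  unfold Claim_equal_transform
  intro grid _ _
  unfold Spec_transform
  by_cases hg : grid = [] ∨ grid.headD [] = []
  · simp only [transform, transform_alt, if_pos hg]
  · simp only [transform, transform_alt, if_neg hg]
    have hgrow : grid ≠ [] := fun h => hg (Or.inl h)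
    have hgcol : grid.headD [] ≠ [] := fun h => hg (Or.inr h)
    refine fill_mark_congr grid _ _ _ _ ?_
    intro p
    exact (transformA_visited grid hgrow hgcol p).trans (transformB_reach grid p).symm
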